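-- pv_equiv track=rewrite | github.com/pj-000/pptagent | config.py | _normalize_openai_base_url
-- ===== SOURCE A (Python) =====
-- def _normalize_openai_base_url(url: str) -> str:
--     """
--     OpenAI-compatible SDK expects a base URL like:
--     https://openrouter.ai/api/v1
--     rather than a full endpoint like:
--     https://openrouter.ai/api/v1/chat/completions
--     """
--     normalized = (url or "").strip().rstrip("/")
--     for suffix in (
--         "/chat/completions",
--         "/completions",
--         "/responses",
--     ):
--         if normalized.endswith(suffix):
--             return normalized[: -len(suffix)]
--     return normalized
-- ===== SOURCE B (Python) =====
-- def _normalize_openai_base_url(url: str) -> str: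
--     """Locate the last path segment via rfind instead of testing suffixes:
--     split at the final '/', compare the tail segment, and peel '/chat' too
--     when the tail was 'completions'."""
--     normalized = (url or "").strip().rstrip("/")
--     cut = normalized.rfind("/")
--     if cut != -1:
--         tail = normalized[cut:]
--         if tail == "/completions":
--             head = normalized[:cut]
--             cut2 = head.rfind("/")
--             if cut2 != -1 and head[cut2:] == "/chat":
--                 return head[:cut2]
--             return head
--         if tail == "/responses":
--             return normalized[:cut]
--     return normalized
-- ===== Notes on version B (the rewrite author's own statement) =====
-- stated objective: alternative
-- what changed: Replaces the endswith-suffix loop over three candidate strings by locating the last '/' with rfind and comparing the final path segment (peeling '/chat' as a second segment when the tail is 'completions').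
import Mathlib
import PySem

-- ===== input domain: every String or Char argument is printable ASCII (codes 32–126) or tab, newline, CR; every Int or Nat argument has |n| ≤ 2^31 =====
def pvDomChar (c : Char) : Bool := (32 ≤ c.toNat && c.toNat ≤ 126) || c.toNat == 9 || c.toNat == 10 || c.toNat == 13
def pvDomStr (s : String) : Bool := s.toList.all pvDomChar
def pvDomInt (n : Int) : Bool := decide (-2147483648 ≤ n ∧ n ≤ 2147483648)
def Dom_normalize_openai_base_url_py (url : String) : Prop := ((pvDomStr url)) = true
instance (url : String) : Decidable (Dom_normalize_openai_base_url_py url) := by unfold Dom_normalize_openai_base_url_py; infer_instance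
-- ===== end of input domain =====

-- B replaces A's endswith-suffix loop by locating the last '/' with rfind and comparing the final
-- path segment (alternative decomposition, same cost).


-- ===== PORT A =====
-- hand-port of Python's s.rstrip("/") (strip the trailing characters that are '/'); exact on all strings
def pvRstripSlash (cs : List Char) : List Char := (cs.reverse.dropWhile (· == '/')).reverse

-- A's for-loop over the three candidate suffixes: first endswith match returns normalized[:-len(suffix)]
def pvSuffixLoop (normalized : List Char) : List (List Char) → List Char
  | [] => normalized
  | sfx :: rest =>
    if PySem.Chars.endswith normalized sfx then
      PySem.Chars.slice normalized none (some (-(sfx.length : Int)))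
    else pvSuffixLoop normalized rest

def normalize_openai_base_url_py (url : String) : String :=
  let base := if url == "" then "" else url   -- (url or "")
  let normalized := pvRstripSlash (PySem.Chars.strip base.toList)
  String.ofList (pvSuffixLoop normalized
    ["/chat/completions".toList, "/completions".toList, "/responses".toList])

-- ===== PORT B =====
-- B's body after the shared preprocessing: cut at the last '/', compare the tail segment
def pvTailCut (normalized : List Char) : List Char :=
  let cut := PySem.Chars.rfind normalized ['/']
  if cut ≠ -1 then
    let tail := PySem.Chars.slice normalized (some cut) none
    if tail = "/completions".toList then
      let head := PySem.Chars.slice normalized none (some cut)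
      let cut2 := PySem.Chars.rfind head ['/']
      if cut2 ≠ -1 ∧ PySem.Chars.slice head (some cut2) none = "/chat".toList then
        PySem.Chars.slice head none (some cut2)
      else head
    else if tail = "/responses".toList then
      PySem.Chars.slice normalized none (some cut)
    else normalized
  else normalized

def normalize_openai_base_url_py_alt (url : String) : String :=
  let base := if url == "" then "" else url   -- (url or "")
  let normalized := pvRstripSlash (PySem.Chars.strip base.toList)
  String.ofList (pvTailCut normalized)

-- ===== PRECONDITION & SPEC =====
def Spec_normalize_openai_base_url_py (url : String) (out : String) : Prop := out = normalize_openai_base_url_py_alt url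
instance (url : String) (out : String) : Decidable (Spec_normalize_openai_base_url_py url out) := by unfold Spec_normalize_openai_base_url_py; infer_instance

-- ===== CLAIM (what is proved, stated in full; the proofs are below) =====
def Claim_equal_normalize_openai_base_url_py : Prop := ∀ (url : String), Dom_normalize_openai_base_url_py url → Spec_normalize_openai_base_url_py url (normalize_openai_base_url_py url)

-- ===== LEMMAS AND PROOFS =====

lemma not_prefix_slash {cs : List Char} (h : '/' ∉ cs) (j : ℕ) :
    ¬ (['/'].isPrefixOf (cs.drop j) = true) := by
  intro hp
  have : '/' ∈ cs.drop j := (List.isPrefixOf_iff_prefix.mp hp).subset (by simp)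
  exact h (List.drop_subset j cs this)

lemma rfind_go_no_slash (cs : List Char) (h : '/' ∉ cs) (k : ℕ) :
    PySem.Chars.rfind.go cs ['/'] k = -1 := by
  induction k with
  | zero =>
    simp only [PySem.Chars.rfind.go]
    rw [if_neg (by simpa using not_prefix_slash h 0)]
  | succ j ih =>
    simp only [PySem.Chars.rfind.go]
    rw [if_neg (by simpa using not_prefix_slash h (j+1))]
    exact ih

lemma rfind_no_slash (cs : List Char) (h : '/' ∉ cs) :
    PySem.Chars.rfind cs ['/'] = -1 := by
  simp [PySem.Chars.rfind, rfind_go_no_slash cs h]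

lemma rfind_go_last (t w : List Char) (hw : '/' ∉ w) :
    ∀ k : ℕ, t.length ≤ k →
      PySem.Chars.rfind.go (t ++ '/' :: w) ['/'] k = (t.length : Int) := by
  intro k
  induction k with
  | zero =>
    intro hk
    have ht : t.length = 0 := Nat.le_zero.mp hk
    have ht' : t = [] := List.length_eq_zero_iff.mp ht
    subst ht'
    simp [PySem.Chars.rfind.go, List.isPrefixOf]
  | succ j ih =>
    intro hk
    rcases Nat.lt_or_ge j.succ t.length with hlt | hge
    · omega
    rcases Nat.eq_or_lt_of_le hge with heq | hgt
    · -- j+1 = t.length : prefix found here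
      have hdrop : (t ++ '/' :: w).drop (j+1) = '/' :: w := List.drop_left' heq
      simp [PySem.Chars.rfind.go, hdrop, List.isPrefixOf, heq]
    · -- j+1 > t.length : position j+1 is inside w (or past the end)
      have hnp : ¬ (['/'].isPrefixOf ((t ++ '/' :: w).drop (j+1)) = true) := by
        have hdrop : (t ++ '/' :: w).drop (j+1) = w.drop (j - t.length) := by
          have h1 : j + 1 = t.length + (j + 1 - t.length) := by omega
          rw [h1, List.drop_append]
          have h2 : j + 1 - t.length = (j - t.length) + 1 := by omega
          rw [h2]
          simp
        rw [hdrop]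
        exact not_prefix_slash (fun hm => hw (List.drop_subset _ w hm)) 0
      have hdrop0 : ((t ++ '/' :: w).drop (j+1)).drop 0 = (t ++ '/' :: w).drop (j+1) := by simp
      simp only [PySem.Chars.rfind.go]
      rw [if_neg (by simpa using hnp)]
      exact ih (by omega)

lemma rfind_last (t w : List Char) (hw : '/' ∉ w) :
    PySem.Chars.rfind (t ++ '/' :: w) ['/'] = (t.length : Int) := by
  have := rfind_go_last t w hw (t ++ '/' :: w).length (by simp)
  simpa [PySem.Chars.rfind] using this

lemma last_slash_unique {t w u v : List Char} (hw : '/' ∉ w) (hv : '/' ∉ v)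
    (h : t ++ '/' :: w = u ++ '/' :: v) : t = u ∧ w = v := by
  have h1 := rfind_last t w hw
  have h2 := rfind_last u v hv
  rw [h] at h1
  have hlen : t.length = u.length := by
    have := h1.symm.trans h2
    exact_mod_cast this
  obtain ⟨ht, hrest⟩ := List.append_inj h hlen
  exact ⟨ht, by simpa using hrest⟩

lemma endswith_exists {cs p : List Char} :
    PySem.Chars.endswith cs p = true ↔ ∃ u, cs = u ++ p := by
  rw [PySem.Chars.endswith_iff]
  constructor
  · rintro ⟨u, hu⟩; exact ⟨u, hu.symm⟩
  · rintro ⟨u, hu⟩; exact ⟨u, hu.symm⟩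

lemma exists_last_slash (cs : List Char) (h : '/' ∈ cs) :
    ∃ t w, cs = t ++ '/' :: w ∧ '/' ∉ w := by
  induction cs with
  | nil => cases h
  | cons c rest ih =>
    by_cases hr : '/' ∈ rest
    · obtain ⟨t, w, hc, hw⟩ := ih hr
      exact ⟨c :: t, w, by simp [hc], hw⟩
    · have hc : c = '/' := by
        rcases List.mem_cons.mp h with h1 | h1
        · exact h1.symm
        · exact absurd h1 hr
      exact ⟨[], rest, by simp [hc], hr⟩

lemma slice_from_at (x y : List Char) :
    PySem.Chars.slice (x ++ y) (some (x.length : Int)) none = y := by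
  simp only [PySem.Chars.slice_eq_listSlice, PySem.List.slice_from_natCast]
  simp

lemma slice_to_at (x y : List Char) :
    PySem.Chars.slice (x ++ y) none (some (x.length : Int)) = x := by
  simp only [PySem.Chars.slice_eq_listSlice, PySem.List.slice_to_natCast]
  simp

lemma slice_neg_suffix (x s : List Char) (hs : 0 < s.length) :
    PySem.Chars.slice (x ++ s) none (some (-(s.length : Int))) = x := by
  simp only [PySem.Chars.slice_eq_listSlice]
  rw [PySem.List.slice_to_neg_natCast _ _ hs]
  have h1 : (x ++ s).length - s.length = x.length := by simp
  rw [h1]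
  simp

lemma endswith_last {t w u p : List Char} (hw : '/' ∉ w) (hp : '/' ∉ p)
    (h : PySem.Chars.endswith (t ++ '/' :: w) (u ++ '/' :: p) = true) :
    w = p ∧ ∃ a, t = a ++ u := by
  obtain ⟨a, ha⟩ := endswith_exists.mp h
  have h' : t ++ '/' :: w = (a ++ u) ++ '/' :: p := by rw [ha, List.append_assoc]
  obtain ⟨ht, hwp⟩ := last_slash_unique hw hp h'
  exact ⟨hwp, a, ht⟩

lemma body_eq (cs : List Char) :
    pvSuffixLoop cs
      ["/chat/completions".toList, "/completions".toList, "/responses".toList]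
      = pvTailCut cs := by
  have hS17 : "/chat/completions".toList = ('/' :: "chat".toList) ++ '/' :: "completions".toList := by decide
  have hS12 : "/completions".toList = '/' :: "completions".toList := by decide
  have hS10 : "/responses".toList = '/' :: "responses".toList := by decide
  have hS5 : "/chat".toList = '/' :: "chat".toList := by decide
  by_cases hmem : '/' ∈ cs
  · obtain ⟨t, w, rfl, hw⟩ := exists_last_slash cs hmem
    have hcut := rfind_last t w hw
    simp only [pvTailCut, hcut]
    rw [if_pos (show (t.length : Int) ≠ -1 by omega), slice_from_at t ('/' :: w),
        slice_to_at t ('/' :: w)]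
    by_cases hwc : w = "completions".toList
    · subst hwc
      rw [if_pos hS12.symm]
      by_cases hmt : '/' ∈ t
      · obtain ⟨u, v, rfl, hv⟩ := exists_last_slash t hmt
        have hcut2 := rfind_last u v hv
        rw [hcut2, slice_from_at u ('/' :: v), slice_to_at u ('/' :: v)]
        by_cases hvc : v = "chat".toList
        · subst hvc
          rw [if_pos ⟨show (u.length : Int) ≠ -1 by omega, hS5.symm⟩]
          -- A: first suffix matches
          have hcs : (u ++ '/' :: "chat".toList) ++ '/' :: "completions".toList
              = u ++ "/chat/completions".toList := by rw [hS17, List.append_assoc]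
          simp only [pvSuffixLoop]
          rw [if_pos (endswith_exists.mpr ⟨u, hcs⟩), hcs,
              slice_neg_suffix u "/chat/completions".toList (by decide)]
        · rw [if_neg (by
            rintro ⟨-, h2⟩
            rw [hS5] at h2
            exact hvc (List.cons.injEq .. ▸ h2 |>.2))]
          -- A: first suffix fails, second matches
          have h17 : ¬ (PySem.Chars.endswith ((u ++ '/' :: v) ++ '/' :: "completions".toList)
              ("/chat/completions".toList) = true) := by
            rw [hS17]
            intro h
            obtain ⟨-, a, hta⟩ := endswith_last (by decide) (by decide) h
            obtain ⟨-, hvchat⟩ := last_slash_unique hv (by decide) hta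
            exact hvc hvchat
          have hcs : (u ++ '/' :: v) ++ '/' :: "completions".toList
              = (u ++ '/' :: v) ++ "/completions".toList := by rw [hS12]
          simp only [pvSuffixLoop]
          rw [if_neg h17,
              if_pos (endswith_exists.mpr ⟨u ++ '/' :: v, hcs⟩), hcs,
              slice_neg_suffix _ "/completions".toList (by decide)]
      · -- no slash in t: inner cut2 = -1
        rw [rfind_no_slash t hmt]
        rw [if_neg (by rintro ⟨h1, -⟩; exact h1 rfl)]
        have h17 : ¬ (PySem.Chars.endswith (t ++ '/' :: "completions".toList)
            ("/chat/completions".toList) = true) := by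
          rw [hS17]
          intro h
          obtain ⟨-, a, hta⟩ := endswith_last hw (by decide) h
          exact hmt (by rw [hta]; simp)
        have hcs : t ++ '/' :: "completions".toList = t ++ "/completions".toList := by rw [hS12]
        simp only [pvSuffixLoop]
        rw [if_neg h17,
            if_pos (endswith_exists.mpr ⟨t, hcs⟩), hcs,
            slice_neg_suffix t "/completions".toList (by decide)]
    · rw [if_neg (by rw [hS12]; intro h; exact hwc (List.cons.injEq .. ▸ h |>.2))]
      by_cases hwr : w = "responses".toList
      · subst hwr
        rw [if_pos hS10.symm]
        have h17 : ¬ (PySem.Chars.endswith (t ++ '/' :: "responses".toList)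
            ("/chat/completions".toList) = true) := by
          rw [hS17]
          intro h
          exact absurd (endswith_last hw (by decide) h).1 (by decide)
        have h12 : ¬ (PySem.Chars.endswith (t ++ '/' :: "responses".toList)
            ("/completions".toList) = true) := by
          rw [hS12, show ('/' :: "completions".toList : List Char) = [] ++ '/' :: "completions".toList from rfl]
          intro h
          exact absurd (endswith_last hw (by decide) h).1 (by decide)
        have hcs : t ++ '/' :: "responses".toList = t ++ "/responses".toList := by rw [hS10]
        simp only [pvSuffixLoop]
        rw [if_neg h17, if_neg h12,
            if_pos (endswith_exists.mpr ⟨t, hcs⟩), hcs,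
            slice_neg_suffix t "/responses".toList (by decide)]
      · rw [if_neg (by rw [hS10]; intro h; exact hwr (List.cons.injEq .. ▸ h |>.2))]
        have h17 : ¬ (PySem.Chars.endswith (t ++ '/' :: w) ("/chat/completions".toList) = true) := by
          rw [hS17]
          intro h
          exact hwc (endswith_last hw (by decide) h).1
        have h12 : ¬ (PySem.Chars.endswith (t ++ '/' :: w) ("/completions".toList) = true) := by
          rw [hS12, show ('/' :: "completions".toList : List Char) = [] ++ '/' :: "completions".toList from rfl]
          intro h
          exact hwc (endswith_last hw (by decide) h).1
        have h10 : ¬ (PySem.Chars.endswith (t ++ '/' :: w) ("/responses".toList) = true) := by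
          rw [hS10, show ('/' :: "responses".toList : List Char) = [] ++ '/' :: "responses".toList from rfl]
          intro h
          exact hwr (endswith_last hw (by decide) h).1
        simp only [pvSuffixLoop]
        rw [if_neg h17, if_neg h12, if_neg h10]
  · -- no slash anywhere
    have hend : ∀ u p : List Char, '/' ∈ p → ¬ (PySem.Chars.endswith cs p = true) := by
      intro u p hp h
      obtain ⟨a, ha⟩ := endswith_exists.mp h
      exact hmem (by rw [ha]; exact List.mem_append_right a hp)
    simp only [pvSuffixLoop, pvTailCut, rfind_no_slash cs hmem]
    rw [if_neg (hend [] _ (by decide)), if_neg (hend [] _ (by decide)),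
        if_neg (hend [] _ (by decide)), if_neg (by intro h1; exact h1 rfl)]

-- ===== VERDICT (by name: the statement is the Claim_ definition above) =====
theorem normalize_openai_base_url_py_spec : Claim_equal_normalize_openai_base_url_py := by
  intro url _
  unfold Spec_normalize_openai_base_url_py normalize_openai_base_url_py normalize_openai_base_url_py_alt
  exact congrArg String.ofList (body_eq _)
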